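-- pv_equiv track=rewrite | github.com/pyladies-brazil/grupo-estudo-bioinformatica | estudo_rosalind/Fase 3/Exercicio_A_Thayana.py | find_start_stop_codons
-- ===== SOURCE A (Python) =====
-- def find_start_stop_codons(sequence):
--     atg_index = []
--     stop_index = []
--     for i in range(len(sequence)):
--         if sequence[i:i+3] == "ATG":
--             atg_index.append(i)
--         elif sequence[i:i+3] == "TAA":
--             stop_index.append(i)
--         elif sequence[i:i+3] == "TAG":
--             stop_index.append(i)
--         elif sequence[i:i+3] == "TGA":
--             stop_index.append(i)
--     return atg_index, stop_index
-- ===== SOURCE B (Python) =====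
-- def find_start_stop_codons(sequence):
--     def find_all(sub):
--         out = []
--         i = sequence.find(sub)
--         while i != -1:
--             out.append(i)
--             i = sequence.find(sub, i + 1)
--         return out
--
--     atg_index = find_all("ATG")
--     stop_index = find_all("TAA") + find_all("TAG") + find_all("TGA")
--     stop_index.sort()
--     return atg_index, stop_index
-- ===== Notes on version B (the rewrite author's own statement) =====
-- stated objective: faster
-- what changed: Replaces the per-index slice-and-compare scan with str.find loops that jump from occurrence to occurrence (one loop per codon), then merges the three stop-position lists with a single sort.
import Mathlib
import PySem

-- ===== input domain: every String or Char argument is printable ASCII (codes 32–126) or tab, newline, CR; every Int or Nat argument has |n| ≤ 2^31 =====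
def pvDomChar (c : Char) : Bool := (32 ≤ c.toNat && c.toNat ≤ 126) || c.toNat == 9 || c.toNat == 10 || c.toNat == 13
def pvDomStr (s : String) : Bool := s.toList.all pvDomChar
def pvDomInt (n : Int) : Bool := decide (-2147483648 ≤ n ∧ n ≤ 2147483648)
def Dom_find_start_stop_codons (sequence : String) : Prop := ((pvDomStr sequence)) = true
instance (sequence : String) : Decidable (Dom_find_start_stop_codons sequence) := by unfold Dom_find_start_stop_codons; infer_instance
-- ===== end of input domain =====

-- B replaces A's per-index slice-and-compare scan by find-loops that jump from occurrence
-- to occurrence (one per codon) and a sort of the merged stop positions; proved equal on all inputs.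

-- ===== PORT A =====
-- A: for i in range(len(sequence)): compare sequence[i:i+3] against the four codons, append i.
def find_start_stop_codons (sequence : String) : List Int × List Int :=
  (PySem.List.pyRange 0 (PySem.Str.len sequence) 1).foldl
    (fun (st : List Int × List Int) i =>
      let c := PySem.List.slice sequence.toList (some i) (some (i + 3))
      if c = "ATG".toList then (st.1 ++ [i], st.2)
      else if c = "TAA".toList then (st.1, st.2 ++ [i])
      else if c = "TAG".toList then (st.1, st.2 ++ [i])
      else if c = "TGA".toList then (st.1, st.2 ++ [i])
      else st)
    ([], [])

-- ===== PORT B =====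
-- B's while loop 'i = sequence.find(sub); while i != -1: out.append(i); i = sequence.find(sub, i+1)'
-- as recursion on fuel (len+1 iterations suffice: the found index strictly increases and stays < len).
def pyFindAllGo (s sub : List Char) : Nat → Int → List Int
  | 0, _ => []
  | fuel + 1, i =>
    if i = -1 then []
    else i :: pyFindAllGo s sub fuel (PySem.Chars.findFrom s sub (i + 1) none)

def pyFindAll (s sub : List Char) : List Int :=
  pyFindAllGo s sub (s.length + 1) (PySem.Chars.find s sub)

def find_start_stop_codons_alt (sequence : String) : List Int × List Int :=
  let s := sequence.toList
  let atg_index := pyFindAll s "ATG".toList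
  let stop_index := pyFindAll s "TAA".toList ++ pyFindAll s "TAG".toList ++ pyFindAll s "TGA".toList
  (atg_index, PySem.List.sorted stop_index (fun x => x) false)

-- ===== PRECONDITION & SPEC =====
def Spec_find_start_stop_codons (sequence : String) (out : List Int × List Int) : Prop := out = find_start_stop_codons_alt sequence
instance (sequence : String) (out : List Int × List Int) : Decidable (Spec_find_start_stop_codons sequence out) := by unfold Spec_find_start_stop_codons; infer_instance

-- ===== CLAIM (what is proved, stated in full; the proofs are below) =====
def Claim_equal_find_start_stop_codons : Prop := ∀ (sequence : String), Dom_find_start_stop_codons sequence → Spec_find_start_stop_codons sequence (find_start_stop_codons sequence)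

-- ===== LEMMAS AND PROOFS =====

def mapInt : List Nat → List Int := List.map Int.ofNat

-- occurrence positions of sub in s, in increasing order, as Ints
def occList (s sub : List Char) : List Int :=
  mapInt ((List.range s.length).filter (fun k => decide (sub <+: s.drop k)))

-- the slice test of port A is the prefix test, for a length-3 pattern
lemma slice_eq_iff_prefix (s sub : List Char) (k : Nat) (hsub : sub.length = 3) :
    PySem.List.slice s (some ((k : Nat) : Int)) (some (((k : Nat) : Int) + 3)) = sub ↔ sub <+: s.drop k := by
  have h3 : ((k : Nat) : Int) + 3 = (((k + 3 : Nat) : Nat) : Int) := by push_cast; ring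
  rw [h3, PySem.List.slice_natCast]
  have h : k + 3 - k = 3 := by omega
  rw [h, List.prefix_iff_eq_take, hsub, eq_comm]

-- two same-length patterns prefixing the same list are equal
lemma prefix_unique {s sub1 sub2 : List Char} (h1 : sub1 <+: s) (h2 : sub2 <+: s)
    (hl : sub1.length = sub2.length) : sub1 = sub2 := by
  rw [List.prefix_iff_eq_take] at h1 h2
  rw [h1, h2, hl]

-- B-side: the find loop from position k collects exactly the occurrences in [k, len)
lemma pyFindAllGo_spec (s sub : List Char) (hsub : sub ≠ []) :
    ∀ (fuel k : Nat), k ≤ s.length → s.length - k < fuel →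
    pyFindAllGo s sub fuel (PySem.Chars.findFrom s sub (k : Int) none)
      = mapInt ((List.range' k (s.length - k)).filter (fun j => decide (sub <+: s.drop j))) := by
  intro fuel
  induction fuel with
  | zero => intro k hk hf; omega
  | succ fuel ih =>
    intro k hk hf
    by_cases hneg : PySem.Chars.findFrom s sub (k : Int) none = -1
    · rw [hneg]
      rw [PySem.Chars.findFrom_natCast_eq_neg_one_iff s sub k hk] at hneg
      have hfil : (List.range' k (s.length - k)).filter (fun j => decide (sub <+: s.drop j)) = [] := by
        rw [List.filter_eq_nil_iff]
        intro j hj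
        simp only [decide_eq_true_eq]
        intro hpre
        apply hneg
        have hkj : k ≤ j := (List.mem_range'_1.mp hj).1
        have hd : s.drop j = (s.drop k).drop (j - k) := by
          rw [List.drop_drop]; congr 1; omega
        rw [hd] at hpre
        exact hpre.isInfix.trans (List.drop_suffix (j - k) (s.drop k)).isInfix
      rw [hfil]
      simp [pyFindAllGo, mapInt]
    · obtain ⟨hge, hpre, hmin⟩ := PySem.Chars.findFrom_natCast_spec s sub k hk hneg
      set m := PySem.Chars.findFrom s sub (k : Int) none with hm
      have hm0 : (0 : Int) ≤ m := le_trans (by exact_mod_cast Int.natCast_nonneg k) hge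
      have hkm : k ≤ m.toNat := by omega
      have hmn : m.toNat < s.length := by
        have hle := hpre.length_le
        have hpos : 0 < sub.length := List.length_pos_of_ne_nil hsub
        rw [List.length_drop] at hle
        omega
      have hstep : pyFindAllGo s sub (fuel + 1) m
          = m :: pyFindAllGo s sub fuel (PySem.Chars.findFrom s sub (m + 1) none) := by
        rw [pyFindAllGo, if_neg hneg]
      rw [hstep]
      have hcast : m + 1 = (((m.toNat + 1 : Nat)) : Int) := by
        push_cast [Int.toNat_of_nonneg hm0]; ring
      rw [hcast, ih (m.toNat + 1) (by omega) (by omega)]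
      -- split the position range at m.toNat
      have hsplit : List.range' k (s.length - k)
          = List.range' k (m.toNat - k) ++ List.range' m.toNat (s.length - m.toNat) := by
        have := List.range'_append (s := k) (m := m.toNat - k) (n := s.length - m.toNat) (step := 1)
        rw [show k + 1 * (m.toNat - k) = m.toNat by omega] at this
        rw [show (m.toNat - k) + (s.length - m.toNat) = s.length - k by omega] at this
        exact this.symm
      rw [hsplit, List.filter_append]
      have h1 : (List.range' k (m.toNat - k)).filter (fun j => decide (sub <+: s.drop j)) = [] := by
        rw [List.filter_eq_nil_iff]
        intro j hj
        have hj' := List.mem_range'_1.mp hj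
        simp only [decide_eq_true_eq]
        exact hmin j hj'.1 (by omega)
      have h2 : List.range' m.toNat (s.length - m.toNat)
          = m.toNat :: List.range' (m.toNat + 1) (s.length - (m.toNat + 1)) := by
        rw [show s.length - m.toNat = (s.length - (m.toNat + 1)) + 1 by omega, List.range'_succ]
      rw [h1, h2, List.nil_append, List.filter_cons, if_pos (by simpa using hpre)]
      simp [mapInt, Int.toNat_of_nonneg hm0]

lemma pyFindAll_eq_occList (s sub : List Char) (hsub : sub ≠ []) :
    pyFindAll s sub = occList s sub := by
  unfold pyFindAll occList
  have h0 : PySem.Chars.find s sub = PySem.Chars.findFrom s sub ((0 : Nat) : Int) none := by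
    rw [Nat.cast_zero, PySem.Chars.findFrom_zero]
  rw [h0, pyFindAllGo_spec s sub hsub (s.length + 1) 0 (by omega) (by omega)]
  rw [List.range_eq_range', Nat.sub_zero]

-- the fold of port A with general accumulators
lemma foldAux (s : List Char) :
    ∀ (n : Nat) (a b : List Int),
    (List.range n).foldl
      (fun (st : List Int × List Int) (k : Nat) =>
        let c := PySem.List.slice s (some ((k : Nat) : Int)) (some (((k : Nat) : Int) + 3))
        if c = "ATG".toList then (st.1 ++ [((k : Nat) : Int)], st.2)
        else if c = "TAA".toList then (st.1, st.2 ++ [((k : Nat) : Int)])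
        else if c = "TAG".toList then (st.1, st.2 ++ [((k : Nat) : Int)])
        else if c = "TGA".toList then (st.1, st.2 ++ [((k : Nat) : Int)])
        else st)
      (a, b)
    = (a ++ mapInt ((List.range n).filter (fun k => decide ("ATG".toList <+: s.drop k))),
       b ++ mapInt ((List.range n).filter (fun k =>
          decide ("TAA".toList <+: s.drop k) || decide ("TAG".toList <+: s.drop k)
            || decide ("TGA".toList <+: s.drop k)))) := by
  intro n
  induction n with
  | zero => intro a b; simp [mapInt]
  | succ n ih =>
    intro a b
    have eA : "ATG".toList = ['A', 'T', 'G'] := by decide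
    have e1 : "TAA".toList = ['T', 'A', 'A'] := by decide
    have e2 : "TAG".toList = ['T', 'A', 'G'] := by decide
    have e3 : "TGA".toList = ['T', 'G', 'A'] := by decide
    rw [List.range_succ, List.foldl_append, ih a b, List.foldl_cons, List.foldl_nil]
    simp only [eA, e1, e2, e3]
    by_cases hA : ['A', 'T', 'G'] <+: s.drop n
    · have hTAA : ¬ ['T', 'A', 'A'] <+: s.drop n := fun h => by
        have := prefix_unique hA h (by decide); simp at this
      have hTAG : ¬ ['T', 'A', 'G'] <+: s.drop n := fun h => by
        have := prefix_unique hA h (by decide); simp at this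
      have hTGA : ¬ ['T', 'G', 'A'] <+: s.drop n := fun h => by
        have := prefix_unique hA h (by decide); simp at this
      rw [if_pos ((slice_eq_iff_prefix s ['A', 'T', 'G'] n (by decide)).mpr hA)]
      simp [mapInt, hA, hTAA, hTAG, hTGA]
    · rw [if_neg (fun h => hA ((slice_eq_iff_prefix s ['A', 'T', 'G'] n (by decide)).mp h))]
      by_cases h1 : ['T', 'A', 'A'] <+: s.drop n
      · rw [if_pos ((slice_eq_iff_prefix s ['T', 'A', 'A'] n (by decide)).mpr h1)]
        simp [mapInt, hA, h1]
      · rw [if_neg (fun h => h1 ((slice_eq_iff_prefix s ['T', 'A', 'A'] n (by decide)).mp h))]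
        by_cases h2 : ['T', 'A', 'G'] <+: s.drop n
        · rw [if_pos ((slice_eq_iff_prefix s ['T', 'A', 'G'] n (by decide)).mpr h2)]
          simp [mapInt, hA, h1, h2]
        · rw [if_neg (fun h => h2 ((slice_eq_iff_prefix s ['T', 'A', 'G'] n (by decide)).mp h))]
          by_cases h3 : ['T', 'G', 'A'] <+: s.drop n
          · rw [if_pos ((slice_eq_iff_prefix s ['T', 'G', 'A'] n (by decide)).mpr h3)]
            simp [mapInt, hA, h1, h2, h3]
          · rw [if_neg (fun h => h3 ((slice_eq_iff_prefix s ['T', 'G', 'A'] n (by decide)).mp h))]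
            simp [mapInt, hA, h1, h2, h3]

-- disjoint filters split a disjunctive filter (up to permutation)
lemma filter_or_perm {α : Type} (l : List α) (p q : α → Bool)
    (h : ∀ x ∈ l, ¬(p x = true ∧ q x = true)) :
    (l.filter (fun x => p x || q x)).Perm (l.filter p ++ l.filter q) := by
  induction l with
  | nil => simp
  | cons x t ih =>
    have hx := h x (by simp)
    have ht : ∀ y ∈ t, ¬(p y = true ∧ q y = true) := fun y hy => h y (by simp [hy])
    rw [List.filter_cons, List.filter_cons, List.filter_cons]
    by_cases hp : p x = true
    · have hq : q x = false := by
        cases hqx : q x with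
        | true => exact absurd ⟨hp, hqx⟩ hx
        | false => rfl
      simp only [hp, hq, Bool.true_or, if_pos, Bool.false_eq_true, if_false]
      exact ((ih ht).cons x).trans (by simp)
    · have hp' : p x = false := by simpa using hp
      by_cases hq : q x = true
      · simp only [hp', hq, Bool.false_or, if_true, Bool.false_eq_true, if_false]
        exact ((ih ht).cons x).trans List.perm_middle.symm
      · have hq' : q x = false := by simpa using hq
        simp only [hp', hq', Bool.false_or, Bool.false_eq_true, if_false]
        exact ih ht

lemma not_both (s : List Char) (k : Nat) (sub1 sub2 : List Char) (hne : sub1 ≠ sub2)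
    (hl : sub1.length = sub2.length) :
    ¬(decide (sub1 <+: s.drop k) = true ∧ decide (sub2 <+: s.drop k) = true) := by
  rintro ⟨h1, h2⟩
  exact hne (prefix_unique (of_decide_eq_true h1) (of_decide_eq_true h2) hl)

-- the merged-and-sorted stop list equals the single disjunctive filter
lemma stop_sorted (s : List Char) :
    PySem.List.sorted (occList s "TAA".toList ++ occList s "TAG".toList ++ occList s "TGA".toList)
        (fun x => x) false
      = mapInt ((List.range s.length).filter (fun k =>
          decide ("TAA".toList <+: s.drop k) || decide ("TAG".toList <+: s.drop k)
            || decide ("TGA".toList <+: s.drop k))) := by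
  apply PySem.List.sorted_eq_of_perm_of_pairwise_lt
  · unfold occList
    simp only [mapInt, ← List.map_append]
    apply List.Perm.map
    have d12 := fun x (_ : x ∈ List.range s.length) =>
      not_both s x "TAA".toList "TAG".toList (by decide) (by decide)
    have d123 : ∀ x ∈ List.range s.length,
        ¬((decide ("TAA".toList <+: s.drop x) || decide ("TAG".toList <+: s.drop x)) = true
          ∧ decide ("TGA".toList <+: s.drop x) = true) := by
      rintro x hx ⟨h12, h3⟩
      rcases Bool.or_eq_true_iff.mp h12 with h | h
      · exact not_both s x "TAA".toList "TGA".toList (by decide) (by decide) ⟨h, h3⟩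
      · exact not_both s x "TAG".toList "TGA".toList (by decide) (by decide) ⟨h, h3⟩
    exact (filter_or_perm (List.range s.length) _ _ d123).trans
      (List.Perm.append_right _ (filter_or_perm (List.range s.length) _ _ d12))
  · simp only [mapInt, List.pairwise_map]
    exact (List.pairwise_lt_range.filter _).imp (fun h => Int.ofNat_lt.mpr h)

-- ===== VERDICT (by name: the statement is the Claim_ definition above) =====
theorem find_start_stop_codons_spec : Claim_equal_find_start_stop_codons := by
  intro sequence _
  show find_start_stop_codons sequence = find_start_stop_codons_alt sequence
  unfold find_start_stop_codons find_start_stop_codons_alt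
  rw [PySem.Str.len_eq, PySem.List.pyRange_one]
  simp only [Int.sub_zero, Int.toNat_natCast, List.foldl_map, zero_add]
  rw [foldAux sequence.toList sequence.toList.length [] []]
  simp only [List.nil_append]
  rw [pyFindAll_eq_occList _ _ (by decide), pyFindAll_eq_occList _ _ (by decide),
      pyFindAll_eq_occList _ _ (by decide), pyFindAll_eq_occList _ _ (by decide),
      stop_sorted]
  rfl
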